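-- pv_equiv track=rewrite | github.com/MrBrantCode/unitest_baseline | mut_generate/mist_train_taco/taco_17270/solution.py | find_lexicographically_smallest_string
-- ===== SOURCE A (Python) =====
-- def find_lexicographically_smallest_string(L: int, s: str, t: str) -> str:
--     # Ensure s is lexicographically smaller than t
--     if s + t > t + s:
--         s, t = t, s
--
--     ls = len(s)
--     lt = len(t)
--
--     # Find the maximum number of times s can be used
--     for i in range(L // ls, -1, -1):
--         if (L - ls * i) % lt == 0:
--             # Generate the string with i copies of s and the remaining length filled with t
--             ans = s * i + t * ((L - ls * i) // lt)
--             return ans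
-- ===== SOURCE B (Python) =====
-- def _gcd(a, b):
--     return a if b == 0 else _gcd(b, a % b)
--
--
-- def find_lexicographically_smallest_string(L: int, s: str, t: str) -> str:
--     # Ensure s is lexicographically smaller than t
--     if s + t > t + s:
--         s, t = t, s
--
--     ls = len(s)
--     lt = len(t)
--
--     # Counts i of s and j of t must satisfy ls*i + lt*j == L.  Maximising i is
--     # minimising j, and the valid j form the residue class of j0 modulo ls//g
--     # where g = gcd(ls, lt); the smallest non-negative one is j0 itself.
--     g = _gcd(ls, lt)
--     if L < 0 or L % g != 0:
--         return None  # no combination of copies reaches length L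
--     m = ls // g
--     j0 = ((L // g) * pow(lt // g, -1, m)) % m
--     if lt * j0 > L:
--         return None  # smallest valid t-count already overshoots L
--     return s * ((L - lt * j0) // ls) + t * j0
-- ===== Notes on version B (the rewrite author's own statement) =====
-- stated objective: alternative
-- what changed: A's descending trial loop over the count of s-copies is replaced by directly solving the linear congruence lt*j ≡ L (mod ls) with a hand-written Euclidean gcd and an extended-gcd modular inverse (pow(x,-1,m)), picking the smallest valid t-count j0 in closed form.
-- outside the precondition, e.g. on find_lexicographically_smallest_string(1, 'aa', 'bb'): A returns None, B returns None; on find_lexicographically_smallest_string(-2, 'a', 'b'): A returns None, B returns None; on find_lexicographically_smallest_string(3, '', 'ab'): A raises ZeroDivisionError, B returns None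
import Mathlib
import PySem

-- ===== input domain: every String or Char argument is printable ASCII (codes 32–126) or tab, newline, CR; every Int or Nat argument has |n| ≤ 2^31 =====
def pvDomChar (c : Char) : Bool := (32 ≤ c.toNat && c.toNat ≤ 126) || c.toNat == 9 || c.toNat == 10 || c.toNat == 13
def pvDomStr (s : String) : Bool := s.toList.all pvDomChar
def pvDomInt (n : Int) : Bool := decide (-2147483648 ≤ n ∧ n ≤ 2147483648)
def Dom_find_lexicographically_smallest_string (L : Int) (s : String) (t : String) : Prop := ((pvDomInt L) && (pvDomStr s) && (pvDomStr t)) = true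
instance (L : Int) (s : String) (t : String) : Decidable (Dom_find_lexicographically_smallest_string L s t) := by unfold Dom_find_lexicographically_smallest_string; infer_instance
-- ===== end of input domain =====

-- B replaces A's descending trial loop over the s-count by a closed-form solution of the
-- linear congruence lt*j ≡ L (mod ls) via extended gcd (objective: alternative algorithm).

-- Python's  s * k  (string repetition), shared by both ports
def pvStrMul (cs : List Char) (k : Nat) : List Char := (List.replicate k cs).flatten

-- ===== PORT A =====
-- the body of A's for-loop over the descending range; first hit returns
def pvLoopA (sc tc : List Char) (L ls lt : Int) : List Int → String
  | [] => ""  -- Python falls off the function returning None (not a str); outside Pre_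
  | i :: rest =>
    if PySem.Int.mod (L - ls * i) lt == 0 then
      String.ofList (pvStrMul sc i.toNat ++ pvStrMul tc (PySem.Int.floordiv (L - ls * i) lt).toNat)
    else pvLoopA sc tc L ls lt rest

def find_lexicographically_smallest_string (L : Int) (s : String) (t : String) : String :=
  -- if s + t > t + s: s, t = t, s   (Python str compare = lexicographic on code points)
  let p := if (t.toList ++ s.toList) < (s.toList ++ t.toList) then (t, s) else (s, t)
  let sc := p.1.toList
  let tc := p.2.toList
  let ls : Int := sc.length
  let lt : Int := tc.length
  pvLoopA sc tc L ls lt (PySem.List.pyRange (PySem.Int.floordiv L ls) (-1) (-1))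

-- ===== PORT B =====
-- B's hand-written recursive gcd (exact for Python's _gcd on non-negative ints)
def pvGcd : Nat → Nat → Nat
  | a, 0 => a
  | a, b + 1 => pvGcd (b + 1) (a % (b + 1))
termination_by _a b => b
decreasing_by exact Nat.mod_lt _ (Nat.succ_pos b)

-- hand port of Python's  pow(x, -1, m)  (modular inverse via extended gcd);
-- exact for 0 < m and gcd(x, m) = 1, which holds everywhere B calls it (Python raises elsewhere)
def pvModInv (x m : Nat) : Nat := ((Nat.gcdA x m) % (m : Int)).toNat

def find_lexicographically_smallest_string_alt (L : Int) (s : String) (t : String) : String :=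
  let p := if (t.toList ++ s.toList) < (s.toList ++ t.toList) then (t, s) else (s, t)
  let sc := p.1.toList
  let tc := p.2.toList
  let ls := sc.length
  let lt := tc.length
  let g := pvGcd ls lt
  if L < 0 ∨ PySem.Int.mod L (g : Int) ≠ 0 then ""  -- Python returns None (not a str); outside Pre_
  else
    -- L ≥ 0 here, so Python's  L // g  and  rem // ls  are Nat divisions on L.toNat
    if L.toNat < lt * ((L.toNat / g * pvModInv (lt / g) (ls / g)) % (ls / g)) then ""
      -- Python: rem = L - lt*j0 < 0, returns None (not a str); outside Pre_
    else
      String.ofList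
        (pvStrMul sc ((L.toNat - lt * ((L.toNat / g * pvModInv (lt / g) (ls / g)) % (ls / g))) / ls) ++
         pvStrMul tc ((L.toNat / g * pvModInv (lt / g) (ls / g)) % (ls / g)))

-- ===== PRECONDITION & SPEC =====
-- Pre_ excludes exactly the inputs on which Python A does not return a str: an empty s or t
-- (ZeroDivisionError), and L < 0 or L not a sum of copies of len(s) and len(t) (A falls
-- through its loop and returns None).
def Pre_find_lexicographically_smallest_string (L : Int) (s : String) (t : String) : Prop :=
  0 ≤ L ∧ s.toList.length ≠ 0 ∧ t.toList.length ≠ 0 ∧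
    ∃ j < s.toList.length,
      t.toList.length * j ≤ L.toNat ∧ s.toList.length ∣ (L.toNat - t.toList.length * j)
instance (L : Int) (s : String) (t : String) : Decidable (Pre_find_lexicographically_smallest_string L s t) := by
  unfold Pre_find_lexicographically_smallest_string; infer_instance

def pvWitness_find_lexicographically_smallest_string : Int × String × String := (5, "ab", "b")

def Spec_find_lexicographically_smallest_string (L : Int) (s : String) (t : String) (out : String) : Prop := out = find_lexicographically_smallest_string_alt L s t
instance (L : Int) (s : String) (t : String) (out : String) : Decidable (Spec_find_lexicographically_smallest_string L s t out) := by unfold Spec_find_lexicographically_smallest_string; infer_instance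

-- ===== CLAIM (what is proved, stated in full; the proofs are below) =====
def Claim_equal_find_lexicographically_smallest_string : Prop := ∀ (L : Int) (s : String) (t : String), Dom_find_lexicographically_smallest_string L s t → Pre_find_lexicographically_smallest_string L s t → Spec_find_lexicographically_smallest_string L s t (find_lexicographically_smallest_string L s t)

-- ===== LEMMAS AND PROOFS =====

theorem pvGcd_eq (a b : Nat) : pvGcd a b = Nat.gcd a b := by
  induction a, b using pvGcd.induct with
  | case1 a => simp [pvGcd]
  | case2 a b ih =>
    rw [pvGcd, ih, Nat.gcd_comm, ← Nat.gcd_rec, Nat.gcd_comm]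


theorem pvModInv_spec (x m : Nat) (hm : 0 < m) (h : Nat.gcd x m = 1) :
    (m : Int) ∣ ((x : Int) * (pvModInv x m : Int) - 1) := by
  have hm' : (0:Int) < m := by exact_mod_cast hm
  have h0 : ((pvModInv x m : Nat) : Int) = (Nat.gcdA x m) % (m : Int) := by
    unfold pvModInv
    exact Int.toNat_of_nonneg (Int.emod_nonneg _ (by omega))
  rw [h0]
  have hid : ((Nat.gcd x m : Nat) : Int) = x * Nat.gcdA x m + m * Nat.gcdB x m :=
    Nat.gcd_eq_gcd_ab x m
  rw [h] at hid
  push_cast at hid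
  have h2 : Nat.gcdA x m % (m:Int) + m * (Nat.gcdA x m / m) = Nat.gcdA x m :=
    Int.emod_add_mul_ediv _ _
  refine ⟨-(Nat.gcdB x m) - x * (Nat.gcdA x m / m), ?_⟩
  linear_combination (x:Int) * h2 - hid

theorem pvLoopA_eq (sc tc : List Char) (L ls lt : Int) (k : Nat)
    (hex : ∃ i ≤ k, PySem.Int.mod (L - ls * (i : Int)) lt = 0) :
    pvLoopA sc tc L ls lt (PySem.List.pyRange (k : Int) (-1) (-1)) =
      (let i := Nat.findGreatest (fun i => PySem.Int.mod (L - ls * (i : Int)) lt = 0) k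
       String.ofList (pvStrMul sc i ++ pvStrMul tc (PySem.Int.floordiv (L - ls * (i : Int)) lt).toNat)) := by
  induction k with
  | zero =>
    obtain ⟨i, hi, hP⟩ := hex
    interval_cases i
    rw [PySem.List.pyRange_neg_one_cons (by norm_num), PySem.List.pyRange_neg_one_eq_nil (by norm_num)]
    rw [pvLoopA, if_pos (by simpa using hP)]
    simp [Nat.findGreatest]
  | succ k ih =>
    rw [PySem.List.pyRange_neg_one_cons (by omega)]
    have hc : ((k + 1 : ℕ) : ℤ) - 1 = (k : ℤ) := by push_cast; ring
    rw [pvLoopA, hc]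
    by_cases hP : PySem.Int.mod (L - ls * ((k + 1 : ℕ) : Int)) lt = 0
    · rw [if_pos (by simpa using hP)]
      simp only [Nat.findGreatest_succ, if_pos hP]
      simp
    · rw [if_neg (by simpa using hP)]
      have hex' : ∃ i ≤ k, PySem.Int.mod (L - ls * (i : Int)) lt = 0 := by
        obtain ⟨i, hi, hPi⟩ := hex
        rcases Nat.lt_or_ge i (k+1) with h | h
        · exact ⟨i, by omega, hPi⟩
        · have he : i = k + 1 := by omega
          subst he; exact absurd hPi hP
      rw [ih hex']
      simp only [Nat.findGreatest_succ, if_neg hP]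

theorem pv_j0 (a b n : ℕ) (ha : 0 < a) (_hb : 0 < b)
    (hex : ∃ i j : ℕ, a * i + b * j = n)
    (j0 : ℕ)
    (hj0 : j0 = ((n / Nat.gcd a b) * pvModInv (b / Nat.gcd a b) (a / Nat.gcd a b)) % (a / Nat.gcd a b)) :
    Nat.gcd a b ∣ n ∧
    ((a:ℤ) ∣ (n:ℤ) - (b:ℤ) * (j0:ℤ)) ∧
    b * j0 ≤ n ∧
    (∀ j : ℕ, (a:ℤ) ∣ (n:ℤ) - (b:ℤ) * (j:ℤ) → j0 ≤ j) := by
  set g := Nat.gcd a b with hgdef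
  have hg : 0 < g := Nat.gcd_pos_of_pos_left b ha
  have hga : g ∣ a := Nat.gcd_dvd_left a b
  have hgb : g ∣ b := Nat.gcd_dvd_right a b
  have hgn : g ∣ n := by
    obtain ⟨i, j, hij⟩ := hex
    exact hij ▸ Nat.dvd_add (Dvd.dvd.mul_right hga i) (Dvd.dvd.mul_right hgb j)
  set m := a / g with hmdef
  set b' := b / g with hbdef
  set n' := n / g with hndef
  set inv := pvModInv b' m with hinvdef
  have hj0def : j0 = (n' * inv) % m := hj0
  have hm : 0 < m := Nat.div_pos (Nat.le_of_dvd ha hga) hg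
  have hco : Nat.Coprime m b' := Nat.coprime_div_gcd_div_gcd hg
  have hinv : (m:ℤ) ∣ (b':ℤ) * (inv:ℤ) - 1 := pvModInv_spec b' m hm hco.symm
  have ham : a = g * m := (Nat.mul_div_cancel' hga).symm
  have hbm : b = g * b' := (Nat.mul_div_cancel' hgb).symm
  have hnm : n = g * n' := (Nat.mul_div_cancel' hgn).symm
  have hj0lt : j0 < m := hj0def ▸ Nat.mod_lt _ hm
  -- (I)
  have hI : (a:ℤ) ∣ (n:ℤ) - b * j0 := by
    have hmdvd : (m:ℤ) ∣ (n':ℤ) - b' * j0 := by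
      obtain ⟨c1, hc1⟩ := hinv
      have hc2 : ((n' * inv : ℕ):ℤ) - j0 = m * (((n' * inv : ℕ):ℤ) / m) := by
        have := Int.emod_add_mul_ediv ((n' * inv : ℕ):ℤ) (m:ℤ)
        have hcast : (j0:ℤ) = ((n' * inv : ℕ):ℤ) % (m:ℤ) := by
          rw [hj0def]; push_cast; omega
        omega
      refine ⟨-(n':ℤ) * c1 + b' * (((n' * inv : ℕ):ℤ) / m), ?_⟩
      push_cast at hc2 ⊢
      linear_combination (-(n':ℤ)) * hc1 + (b':ℤ) * hc2
    obtain ⟨c, hc⟩ := hmdvd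
    refine ⟨c, ?_⟩
    rw [ham, hnm, hbm]
    push_cast
    linear_combination (g:ℤ) * hc
  -- (III)
  have hIII : ∀ j : ℕ, (a:ℤ) ∣ (n:ℤ) - b * j → j0 ≤ j := by
    intro j hdvd
    have h1 : (a:ℤ) ∣ (b:ℤ) * j - b * j0 := by
      obtain ⟨c1, hc1⟩ := hdvd
      obtain ⟨c2, hc2⟩ := hI
      exact ⟨c2 - c1, by linear_combination hc2 - hc1⟩
    have h2 : (m:ℤ) ∣ (b':ℤ) * ((j:ℤ) - j0) := by
      obtain ⟨c, hc⟩ := h1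
      refine ⟨c, ?_⟩
      have hgz : (g:ℤ) ≠ 0 := by exact_mod_cast hg.ne'
      rw [ham, hbm] at hc
      push_cast at hc
      have : (g:ℤ) * ((b':ℤ) * ((j:ℤ) - j0)) = (g:ℤ) * ((m:ℤ) * c) := by ring_nf; linear_combination hc
      have := mul_left_cancel₀ hgz this
      linarith [this]
    have hcoZ : IsCoprime (m:ℤ) (b':ℤ) := Nat.isCoprime_iff_coprime.mpr hco
    have h3 : (m:ℤ) ∣ (j:ℤ) - j0 := hcoZ.dvd_of_dvd_mul_left h2
    obtain ⟨c, hc⟩ := h3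
    by_cases hcpos : 0 ≤ c
    · have : 0 ≤ (m:ℤ) * c := mul_nonneg (by positivity) hcpos
      omega
    · have hcle : c ≤ -1 := by omega
      have : (m:ℤ) * c ≤ (m:ℤ) * (-1) := by
        apply mul_le_mul_of_nonneg_left hcle (by positivity)
      have hj0m : (j0:ℤ) < m := by exact_mod_cast hj0lt
      omega
  -- (II)
  have hII : b * j0 ≤ n := by
    obtain ⟨i, j, hij⟩ := hex
    have hdvd : (a:ℤ) ∣ (n:ℤ) - b * j := ⟨i, by push_cast [← hij]; ring⟩
    have := hIII j hdvd
    calc b * j0 ≤ b * j := Nat.mul_le_mul_left b this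
    _ ≤ n := by omega
  exact ⟨hgn, hI, hII, hIII⟩

theorem pv_main (L : Int) (sc tc : List Char) (hL : 0 ≤ L)
    (ha0 : sc.length ≠ 0) (hb0 : tc.length ≠ 0)
    (hex : ∃ i j : ℕ, sc.length * i + tc.length * j = L.toNat) :
    pvLoopA sc tc L (sc.length : Int) (tc.length : Int)
        (PySem.List.pyRange (PySem.Int.floordiv L (sc.length : Int)) (-1) (-1)) =
      (if L < 0 ∨ PySem.Int.mod L ((pvGcd sc.length tc.length : ℕ) : Int) ≠ 0 then ""
       else
        if L.toNat < tc.length * ((L.toNat / pvGcd sc.length tc.length *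
              pvModInv (tc.length / pvGcd sc.length tc.length) (sc.length / pvGcd sc.length tc.length)) %
              (sc.length / pvGcd sc.length tc.length)) then ""
        else
          String.ofList
            (pvStrMul sc ((L.toNat - tc.length * ((L.toNat / pvGcd sc.length tc.length *
                pvModInv (tc.length / pvGcd sc.length tc.length) (sc.length / pvGcd sc.length tc.length)) %
                (sc.length / pvGcd sc.length tc.length))) / sc.length) ++
             pvStrMul tc ((L.toNat / pvGcd sc.length tc.length *
                pvModInv (tc.length / pvGcd sc.length tc.length) (sc.length / pvGcd sc.length tc.length)) %
                (sc.length / pvGcd sc.length tc.length)))) := by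
  set a := sc.length with hadef
  set b := tc.length with hbdef
  set n := L.toNat with hndef
  have ha : 0 < a := Nat.pos_of_ne_zero ha0
  have hb : 0 < b := Nat.pos_of_ne_zero hb0
  have hLn : L = (n : Int) := (Int.toNat_of_nonneg hL).symm
  rw [pvGcd_eq]
  set g := Nat.gcd a b with hgdef
  set j0 := ((n / g) * pvModInv (b / g) (a / g)) % (a / g) with hj0def
  obtain ⟨hgn, hI, hII, hIII⟩ := pv_j0 a b n ha hb hex j0 (by rw [hj0def, hgdef])
  -- guard 1 is false
  have hmod : PySem.Int.mod L (g : Int) = 0 := by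
    rw [hLn, PySem.Int.mod_natCast]
    have h0 : n % g = 0 := Nat.mod_eq_zero_of_dvd hgn
    simp [h0]
  rw [if_neg (by push Not; exact ⟨by omega, hmod⟩)]
  rw [if_neg (by omega)]
  clear_value j0
  -- the star count of s-copies
  set iStar := (n - b * j0) / a with hiStardef
  have hsub : a ∣ (n - b * j0) := by
    have hz : (a:ℤ) ∣ ((n - b * j0 : ℕ) : ℤ) := by
      rw [Int.natCast_sub hII]; push_cast; exact hI
    exact_mod_cast hz
  have haiStar : a * iStar = n - b * j0 := Nat.mul_div_cancel' hsub
  clear_value iStar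
  have hn_split : n = a * iStar + b * j0 := by omega
  have hiStar_le : iStar ≤ n / a := Nat.le_div_iff_mul_le ha |>.mpr (by rw [Nat.mul_comm]; omega)
  have hPiStar : PySem.Int.mod (L - (a:Int) * (iStar : Int)) (b:Int) = 0 := by
    rw [PySem.Int.mod_eq_zero_iff_dvd]
    refine ⟨(j0:Int), ?_⟩
    rw [hLn, hn_split]; push_cast; ring
  have hfd : PySem.Int.floordiv L (a : Int) = ((n / a : ℕ) : Int) := by
    rw [hLn]; exact PySem.Int.floordiv_natCast n a
  rw [hfd, pvLoopA_eq sc tc L a b (n / a) ⟨iStar, hiStar_le, hPiStar⟩]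
  have hiA_eq : Nat.findGreatest (fun i => PySem.Int.mod (L - (a:Int) * (i : Int)) (b:Int) = 0) (n / a) = iStar := by
    set P : ℕ → Prop := fun i => PySem.Int.mod (L - (a:Int) * (i : Int)) (b:Int) = 0 with hPdef
    set iA := Nat.findGreatest P (n / a) with hiAdef
    apply le_antisymm
    · have hPiA : P iA := Nat.findGreatest_spec hiStar_le hPiStar
      have hiA_le : iA ≤ n / a := hiAdef ▸ Nat.findGreatest_le _
      have haiA : a * iA ≤ n := by
        have h := Nat.le_div_iff_mul_le ha |>.mp hiA_le
        rw [Nat.mul_comm]; exact h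
      have hPiA' : PySem.Int.mod (L - (a:Int) * (iA : Int)) (b:Int) = 0 := hPiA
      rw [PySem.Int.mod_eq_zero_iff_dvd] at hPiA'
      have hbdvd : b ∣ (n - a * iA) := by
        have hzz : (b:ℤ) ∣ ((n - a * iA : ℕ) : ℤ) := by
          rw [Int.natCast_sub haiA]; push_cast
          rw [hLn] at hPiA'; exact_mod_cast hPiA'
        exact_mod_cast hzz
      have hbjA : b * ((n - a * iA) / b) = n - a * iA := Nat.mul_div_cancel' hbdvd
      have hj0jA : j0 ≤ (n - a * iA) / b := by
        apply hIII
        refine ⟨(iA : Int), ?_⟩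
        have hsplit2 : n = a * iA + b * ((n - a * iA) / b) := by omega
        have hz : ((n : ℕ) : ℤ) = ((a * iA + b * ((n - a * iA) / b) : ℕ) : ℤ) :=
          congrArg (fun x : ℕ => (x : ℤ)) hsplit2
        rw [hz]
        push_cast
        ring
      have h1 : b * j0 ≤ b * ((n - a * iA) / b) := Nat.mul_le_mul_left b hj0jA
      have h2 : a * iA ≤ a * iStar := by omega
      exact Nat.le_of_mul_le_mul_left h2 ha
    · exact Nat.le_findGreatest hiStar_le hPiStar
  simp only [hiA_eq]
  have hflq : PySem.Int.floordiv (L - (a:Int) * (iStar : Int)) (b:Int) = ((j0 : ℕ) : Int) := by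
    have harg : L - (a:Int) * (iStar : Int) = ((b * j0 : ℕ) : Int) := by
      rw [hLn, hn_split]; push_cast; ring
    rw [harg, PySem.Int.floordiv_natCast]
    norm_num [Nat.mul_div_cancel_left j0 hb]
  rw [hflq]
  simp

-- ===== VERDICT (by name: the statement is the Claim_ definition above) =====
theorem find_lexicographically_smallest_string_spec : Claim_equal_find_lexicographically_smallest_string := by
  intro L s t _hDom hPre
  obtain ⟨hL, hs, ht, j, _hjlt, hbj, hdvd⟩ := hPre
  have hcancel : s.toList.length * ((L.toNat - t.toList.length * j) / s.toList.length)
      = L.toNat - t.toList.length * j := Nat.mul_div_cancel' hdvd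
  have hsum : s.toList.length * ((L.toNat - t.toList.length * j) / s.toList.length)
      + t.toList.length * j = L.toNat := by omega
  unfold Spec_find_lexicographically_smallest_string
  unfold find_lexicographically_smallest_string find_lexicographically_smallest_string_alt
  by_cases hsw : (t.toList ++ s.toList) < (s.toList ++ t.toList)
  · rw [if_pos hsw]
    exact pv_main L t.toList s.toList hL ht hs
      ⟨j, (L.toNat - t.toList.length * j) / s.toList.length, by rw [Nat.add_comm]; exact hsum⟩
  · rw [if_neg hsw]
    exact pv_main L s.toList t.toList hL hs ht
      ⟨(L.toNat - t.toList.length * j) / s.toList.length, j, hsum⟩
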